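-- pv_equiv track=rewrite | github.com/choidaesig/study_programmers | 프로그래머스/unrated/133499. 옹알이 （2）/옹알이 （2）.py | solution
-- ===== SOURCE A (Python) =====
-- def solution(babbling):
--     answer = ["aya","ye","woo","ma"]
--     cnt=0
--     for i in babbling:  # ["ayaye", "uuu", "yeye", "yemawoo", "ayaayaa"]
--         res=0
--         word=list(i)
--         while len(word)>0:
--             if word[0]=="a":
--                 if res==1:
--                     break
--                 else:
--                     k="".join(word[0:3])
--                     if k in answer:
--                         del word[0:3]
--                         res=1
--                     else:
--                         break
--
--             elif word[0]=="w":
--                 if res==2: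
--                     break
--                 else:
--                     k="".join(word[0:3])
--                     if k in answer:
--                         del word[0:3]
--                         res=2
--                     else:
--                         break
--
--             elif word[0]=="y":
--                 if res==3:
--                     break
--                 else:
--                     k="".join(word[0:2])
--                     if k in answer:
--                         del word[0:2]
--                         res=3
--                     else:
--                         break
--
--             elif word[0]=="m":
--                 if res==4:
--                     break
--                 else:
--                     k="".join(word[0:2])
--                     if k in answer:
--                         del word[0:2]
--                         res=4
--                     else:
--                         break
--             else:
--                 break
--         if len(word)==0:
--             cnt+=1
--     return cnt
-- ===== SOURCE B (Python) =====
-- def solution(babbling):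
--     table = {'a': 'aya', 'y': 'ye', 'w': 'woo', 'm': 'ma'}
--     cnt = 0
--     for s in babbling:
--         i, n, last = 0, len(s), ""
--         while i < n:
--             w = table.get(s[i])
--             if w is None or w == last or not s.startswith(w, i):
--                 break
--             i += len(w)
--             last = w
--         cnt += (i == n)
--     return cnt
-- ===== Notes on version B (the rewrite author's own statement) =====
-- stated objective: faster
-- what changed: B scans each string in place with an advancing index and a first-character dict dispatch to the unique candidate word (checked with startswith and an i==n test at the end), instead of A's per-string char-list copy with repeated del-from-front slice deletions, join-based prefix building and a 4-way elif chain.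
import Mathlib
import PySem

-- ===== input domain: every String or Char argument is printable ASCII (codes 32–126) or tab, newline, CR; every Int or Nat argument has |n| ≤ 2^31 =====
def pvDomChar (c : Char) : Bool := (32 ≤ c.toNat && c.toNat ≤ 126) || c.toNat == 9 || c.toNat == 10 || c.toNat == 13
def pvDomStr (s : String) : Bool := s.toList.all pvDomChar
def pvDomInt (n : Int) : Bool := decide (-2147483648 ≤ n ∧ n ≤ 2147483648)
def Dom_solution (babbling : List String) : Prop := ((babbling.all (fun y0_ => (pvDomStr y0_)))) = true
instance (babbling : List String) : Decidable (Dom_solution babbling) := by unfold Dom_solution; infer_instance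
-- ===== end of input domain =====

-- B replaces A's char-list copy with del-from-front slices and numeric state by an in-place
-- index scan with a first-char dict dispatch (objective: faster, measured).


-- ===== PORT A =====
-- A's inner while loop: word is the remaining char list, res the last-matched word's code.
def loopA (word : List Char) (res : Int) : List Char :=
  match word with
  | [] => []
  | c :: rest =>
    if c = 'a' then
      if res = 1 then c :: rest
      else if String.ofList ((c :: rest).take 3) ∈ ["aya", "ye", "woo", "ma"] then
        loopA ((c :: rest).drop 3) 1
      else c :: rest
    else if c = 'w' then
      if res = 2 then c :: rest
      else if String.ofList ((c :: rest).take 3) ∈ ["aya", "ye", "woo", "ma"] then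
        loopA ((c :: rest).drop 3) 2
      else c :: rest
    else if c = 'y' then
      if res = 3 then c :: rest
      else if String.ofList ((c :: rest).take 2) ∈ ["aya", "ye", "woo", "ma"] then
        loopA ((c :: rest).drop 2) 3
      else c :: rest
    else if c = 'm' then
      if res = 4 then c :: rest
      else if String.ofList ((c :: rest).take 2) ∈ ["aya", "ye", "woo", "ma"] then
        loopA ((c :: rest).drop 2) 4
      else c :: rest
    else c :: rest
termination_by word.length
decreasing_by all_goals simp

def solution (babbling : List String) : Int :=
  babbling.foldl (fun cnt i => if (loopA i.toList 0).length = 0 then cnt + 1 else cnt) 0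

-- ===== PORT B =====
-- B's dict {'a': "aya", 'y': "ye", 'w': "woo", 'm': "ma"} (PySem.Dict, insertion order)
def babTable : PySem.Dict Char String :=
  PySem.Dict.ofList [('a', "aya"), ('y', "ye"), ('w', "woo"), ('m', "ma")]

-- cited by loopB's decreasing_by: any word in the table is nonempty
theorem babTable_items : babTable.items = [('a', "aya"), ('y', "ye"), ('w', "woo"), ('m', "ma")] := by
  decide

theorem babTable_len {c : Char} {w : String} (h : PySem.Dict.get? babTable c = some w) :
    1 ≤ w.length := by
  by_cases h1 : c = 'a'
  · subst h1; rw [show PySem.Dict.get? babTable 'a' = some "aya" from by decide] at h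
    injection h with h; subst h; decide
  · by_cases h2 : c = 'y'
    · subst h2; rw [show PySem.Dict.get? babTable 'y' = some "ye" from by decide] at h
      injection h with h; subst h; decide
    · by_cases h3 : c = 'w'
      · subst h3; rw [show PySem.Dict.get? babTable 'w' = some "woo" from by decide] at h
        injection h with h; subst h; decide
      · by_cases h4 : c = 'm'
        · subst h4; rw [show PySem.Dict.get? babTable 'm' = some "ma" from by decide] at h
          injection h with h; subst h; decide
        · exfalso
          have hn : PySem.Dict.get? babTable c = none := by
            simp [babTable, PySem.Dict.get?, PySem.Dict.ofList]
            intro a b hab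
            have hab2 : (a, b) ∈ babTable.items := hab
            rw [babTable_items] at hab2
            fin_cases hab2
            · exact fun hh => h1 hh.symm
            · exact fun hh => h2 hh.symm
            · exact fun hh => h3 hh.symm
            · exact fun hh => h4 hh.symm
          simp [hn] at h

-- B's inner while loop: i is the scan index, last the previously matched word;
-- returns the final value of i (the loop breaks or runs off the end).
def loopB (s : List Char) (i : Nat) (last : String) : Nat :=
  if hlt : i < s.length then
    match hf : PySem.Dict.get? babTable (s[i]'hlt) with
    | none => i
    | some w =>
      if w = last ∨ ¬ (w.toList.isPrefixOf (s.drop i)) then i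
      else loopB s (i + w.length) w
  else i
termination_by s.length - i
decreasing_by
  have := babTable_len hf
  omega

def solution_alt (babbling : List String) : Int :=
  babbling.foldl (fun cnt s => cnt + (if loopB s.toList 0 "" = s.toList.length then 1 else 0)) 0

-- ===== PRECONDITION & SPEC =====
def Spec_solution (babbling : List String) (out : Int) : Prop := out = solution_alt babbling
instance (babbling : List String) (out : Int) : Decidable (Spec_solution babbling out) := by unfold Spec_solution; infer_instance

-- ===== CLAIM (what is proved, stated in full; the proofs are below) =====
def Claim_equal_solution : Prop := ∀ (babbling : List String), Dom_solution babbling → Spec_solution babbling (solution babbling)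

-- ===== LEMMAS AND PROOFS =====

-- auxB is loopB re-indexed on the remaining suffix of the string (proof helper).
def auxB : List Char → String → Bool
  | [], _ => true
  | c :: rest, last =>
    match hf : (["aya", "ye", "woo", "ma"] : List String).find?
        (fun u => u != last && u.toList.isPrefixOf (c :: rest)) with
    | some u => auxB ((c :: rest).drop u.length) u
    | none => false
termination_by l _ => l.length
decreasing_by
  have hm := List.mem_of_find?_eq_some hf
  have h1 : 1 ≤ u.length := by fin_cases hm <;> decide
  simp; omega

theorem tlA : ("aya" : String).toList = ['a','y','a'] := by decide
theorem tlB : ("ye" : String).toList = ['y','e'] := by decide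
theorem tlC : ("woo" : String).toList = ['w','o','o'] := by decide
theorem tlD : ("ma" : String).toList = ['m','a'] := by decide

theorem auxB_cons (c : Char) (rest : List Char) (last : String) :
    auxB (c :: rest) last =
      (match (["aya","ye","woo","ma"] : List String).find?
          (fun u => u != last && u.toList.isPrefixOf (c :: rest)) with
       | some u => auxB ((c :: rest).drop u.length) u
       | none => false) := by
  rw [auxB]
  split
  · rename_i u heq; rw [heq]
  · rename_i heq; rw [heq]

theorem loopB_unfold (s : List Char) (i : Nat) (last : String) (hlt : i < s.length) :
    loopB s i last =
      (match PySem.Dict.get? babTable (s[i]'hlt) with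
       | none => i
       | some w =>
         if w = last ∨ ¬ (w.toList.isPrefixOf (s.drop i)) then i
         else loopB s (i + w.length) w) := by
  rw [loopB, dif_pos hlt]
  split
  · rename_i heq; rw [heq]
  · rename_i w heq; rw [heq]

theorem loopB_stop (s : List Char) (i : Nat) (last : String) (hlt : i < s.length)
    (hw : PySem.Dict.get? babTable (s[i]'hlt) = none) : loopB s i last = i := by
  rw [loopB_unfold s i last hlt, hw]

theorem loopB_step (s : List Char) (i : Nat) (last : String) (hlt : i < s.length) (w : String)
    (hw : PySem.Dict.get? babTable (s[i]'hlt) = some w) :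
    loopB s i last =
      if w = last ∨ ¬ (w.toList.isPrefixOf (s.drop i)) then i
      else loopB s (i + w.length) w := by
  rw [loopB_unfold s i last hlt, hw]

theorem ipo_take (l r : List Char) : l.isPrefixOf r = true ↔ r.take l.length = l := by
  rw [List.isPrefixOf_iff_prefix, List.prefix_iff_eq_take]; tauto

theorem ofList_inj (a b : List Char) : String.ofList a = String.ofList b ↔ a = b := by
  constructor
  · intro h; have := congrArg String.toList h; simpa using this
  · intro h; rw [h]

theorem mem4 (x : String) :
    x ∈ (["aya","ye","woo","ma"] : List String) ↔
      (x = "aya" ∨ x = "ye" ∨ x = "woo" ∨ x = "ma") := by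
  simp [List.mem_cons]

theorem memA (l : List Char) :
    (String.ofList ('a'::l) ∈ (["aya","ye","woo","ma"] : List String)) ↔ l = ['y','a'] := by
  have h1 : ("aya":String) = String.ofList ['a','y','a'] := rfl
  have h2 : ("ye":String) = String.ofList ['y','e'] := rfl
  have h3 : ("woo":String) = String.ofList ['w','o','o'] := rfl
  have h4 : ("ma":String) = String.ofList ['m','a'] := rfl
  rw [mem4]
  constructor
  · rintro (h|h|h|h)
    · have h' := (ofList_inj _ _).mp (h.trans h1); exact (List.cons_eq_cons.mp h').2
    · have h' := (ofList_inj _ _).mp (h.trans h2); exact absurd (List.cons_eq_cons.mp h').1 (by decide)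
    · have h' := (ofList_inj _ _).mp (h.trans h3); exact absurd (List.cons_eq_cons.mp h').1 (by decide)
    · have h' := (ofList_inj _ _).mp (h.trans h4); exact absurd (List.cons_eq_cons.mp h').1 (by decide)
  · intro h; subst h; exact Or.inl h1.symm

theorem memW (l : List Char) :
    (String.ofList ('w'::l) ∈ (["aya","ye","woo","ma"] : List String)) ↔ l = ['o','o'] := by
  have h1 : ("aya":String) = String.ofList ['a','y','a'] := rfl
  have h2 : ("ye":String) = String.ofList ['y','e'] := rfl
  have h3 : ("woo":String) = String.ofList ['w','o','o'] := rfl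
  have h4 : ("ma":String) = String.ofList ['m','a'] := rfl
  rw [mem4]
  constructor
  · rintro (h|h|h|h)
    · have h' := (ofList_inj _ _).mp (h.trans h1); exact absurd (List.cons_eq_cons.mp h').1 (by decide)
    · have h' := (ofList_inj _ _).mp (h.trans h2); exact absurd (List.cons_eq_cons.mp h').1 (by decide)
    · have h' := (ofList_inj _ _).mp (h.trans h3); exact (List.cons_eq_cons.mp h').2
    · have h' := (ofList_inj _ _).mp (h.trans h4); exact absurd (List.cons_eq_cons.mp h').1 (by decide)
  · intro h; subst h; exact Or.inr (Or.inr (Or.inl h3.symm))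

theorem memY (l : List Char) :
    (String.ofList ('y'::l) ∈ (["aya","ye","woo","ma"] : List String)) ↔ l = ['e'] := by
  have h1 : ("aya":String) = String.ofList ['a','y','a'] := rfl
  have h2 : ("ye":String) = String.ofList ['y','e'] := rfl
  have h3 : ("woo":String) = String.ofList ['w','o','o'] := rfl
  have h4 : ("ma":String) = String.ofList ['m','a'] := rfl
  rw [mem4]
  constructor
  · rintro (h|h|h|h)
    · have h' := (ofList_inj _ _).mp (h.trans h1); exact absurd (List.cons_eq_cons.mp h').1 (by decide)
    · have h' := (ofList_inj _ _).mp (h.trans h2); exact (List.cons_eq_cons.mp h').2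
    · have h' := (ofList_inj _ _).mp (h.trans h3); exact absurd (List.cons_eq_cons.mp h').1 (by decide)
    · have h' := (ofList_inj _ _).mp (h.trans h4); exact absurd (List.cons_eq_cons.mp h').1 (by decide)
  · intro h; subst h; exact Or.inr (Or.inl h2.symm)

theorem memM (l : List Char) :
    (String.ofList ('m'::l) ∈ (["aya","ye","woo","ma"] : List String)) ↔ l = ['a'] := by
  have h1 : ("aya":String) = String.ofList ['a','y','a'] := rfl
  have h2 : ("ye":String) = String.ofList ['y','e'] := rfl
  have h3 : ("woo":String) = String.ofList ['w','o','o'] := rfl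
  have h4 : ("ma":String) = String.ofList ['m','a'] := rfl
  rw [mem4]
  constructor
  · rintro (h|h|h|h)
    · have h' := (ofList_inj _ _).mp (h.trans h1); exact absurd (List.cons_eq_cons.mp h').1 (by decide)
    · have h' := (ofList_inj _ _).mp (h.trans h2); exact absurd (List.cons_eq_cons.mp h').1 (by decide)
    · have h' := (ofList_inj _ _).mp (h.trans h3); exact absurd (List.cons_eq_cons.mp h').1 (by decide)
    · have h' := (ofList_inj _ _).mp (h.trans h4); exact (List.cons_eq_cons.mp h').2
  · intro h; subst h; exact Or.inr (Or.inr (Or.inr h4.symm))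

theorem findA (last : String) (rest : List Char) (h : last ≠ "aya") :
    (["aya","ye","woo","ma"] : List String).find?
        (fun u => u != last && u.toList.isPrefixOf ('a' :: rest))
    = if ['y','a'].isPrefixOf rest then some "aya" else none := by
  have hb : ("aya" != last) = true := by simp [bne_iff_ne]; exact Ne.symm h
  simp [List.find?, List.isPrefixOf, tlA, tlB, tlC, tlD, hb]
  cases hP : ['y','a'].isPrefixOf rest <;> simp [hP, ← List.isPrefixOf_iff_prefix]

theorem findA_self (rest : List Char) :
    (["aya","ye","woo","ma"] : List String).find?
        (fun u => u != "aya" && u.toList.isPrefixOf ('a' :: rest)) = none := by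
  simp [List.find?, List.isPrefixOf, tlA, tlB, tlC, tlD]

theorem findW (last : String) (rest : List Char) (h : last ≠ "woo") :
    (["aya","ye","woo","ma"] : List String).find?
        (fun u => u != last && u.toList.isPrefixOf ('w' :: rest))
    = if ['o','o'].isPrefixOf rest then some "woo" else none := by
  have hb : ("woo" != last) = true := by simp [bne_iff_ne]; exact Ne.symm h
  simp [List.find?, List.isPrefixOf, tlA, tlB, tlC, tlD, hb]
  cases hP : ['o','o'].isPrefixOf rest <;> simp [hP, ← List.isPrefixOf_iff_prefix]

theorem findW_self (rest : List Char) :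
    (["aya","ye","woo","ma"] : List String).find?
        (fun u => u != "woo" && u.toList.isPrefixOf ('w' :: rest)) = none := by
  simp [List.find?, List.isPrefixOf, tlA, tlB, tlC, tlD]

theorem findY (last : String) (rest : List Char) (h : last ≠ "ye") :
    (["aya","ye","woo","ma"] : List String).find?
        (fun u => u != last && u.toList.isPrefixOf ('y' :: rest))
    = if ['e'].isPrefixOf rest then some "ye" else none := by
  have hb : ("ye" != last) = true := by simp [bne_iff_ne]; exact Ne.symm h
  simp [List.find?, List.isPrefixOf, tlA, tlB, tlC, tlD, hb]
  cases hP : ['e'].isPrefixOf rest <;> simp [hP, ← List.isPrefixOf_iff_prefix]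

theorem findY_self (rest : List Char) :
    (["aya","ye","woo","ma"] : List String).find?
        (fun u => u != "ye" && u.toList.isPrefixOf ('y' :: rest)) = none := by
  simp [List.find?, List.isPrefixOf, tlA, tlB, tlC, tlD]

theorem findM (last : String) (rest : List Char) (h : last ≠ "ma") :
    (["aya","ye","woo","ma"] : List String).find?
        (fun u => u != last && u.toList.isPrefixOf ('m' :: rest))
    = if ['a'].isPrefixOf rest then some "ma" else none := by
  have hb : ("ma" != last) = true := by simp [bne_iff_ne]; exact Ne.symm h
  simp [List.find?, List.isPrefixOf, tlA, tlB, tlC, tlD, hb]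
  cases hP : ['a'].isPrefixOf rest <;> simp [hP, ← List.isPrefixOf_iff_prefix]

theorem findM_self (rest : List Char) :
    (["aya","ye","woo","ma"] : List String).find?
        (fun u => u != "ma" && u.toList.isPrefixOf ('m' :: rest)) = none := by
  simp [List.find?, List.isPrefixOf, tlA, tlB, tlC, tlD]

theorem find_other (last : String) (c : Char) (rest : List Char)
    (ha : c ≠ 'a') (hw : c ≠ 'w') (hy : c ≠ 'y') (hm : c ≠ 'm') :
    (["aya","ye","woo","ma"] : List String).find?
        (fun u => u != last && u.toList.isPrefixOf (c :: rest)) = none := by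
  have e1 : ('a' == c) = false := beq_eq_false_iff_ne.mpr (Ne.symm ha)
  have e2 : ('w' == c) = false := beq_eq_false_iff_ne.mpr (Ne.symm hw)
  have e3 : ('y' == c) = false := beq_eq_false_iff_ne.mpr (Ne.symm hy)
  have e4 : ('m' == c) = false := beq_eq_false_iff_ne.mpr (Ne.symm hm)
  simp [List.find?, List.isPrefixOf, tlA, tlB, tlC, tlD, e1, e2, e3, e4]

-- the invariant tying A's numeric state to B's last-word marker
def RelAB (res : Int) (last : String) : Prop :=
  (res = 0 ∧ last = "") ∨ (res = 1 ∧ last = "aya") ∨ (res = 2 ∧ last = "woo") ∨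
    (res = 3 ∧ last = "ye") ∨ (res = 4 ∧ last = "ma")

theorem rel_char (res : Int) (last : String) (h : RelAB res last) :
    (res = 1 ↔ last = "aya") ∧ (res = 2 ↔ last = "woo") ∧
    (res = 3 ↔ last = "ye") ∧ (res = 4 ↔ last = "ma") := by
  rcases h with ⟨h1,h2⟩|⟨h1,h2⟩|⟨h1,h2⟩|⟨h1,h2⟩|⟨h1,h2⟩ <;> subst h1 <;> subst h2 <;> decide

theorem wordLen1 : ("aya" : String).length = 3 := rfl
theorem wordLen2 : ("woo" : String).length = 3 := rfl
theorem wordLen3 : ("ye" : String).length = 2 := rfl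
theorem wordLen4 : ("ma" : String).length = 2 := rfl

theorem aux_main : ∀ (k : Nat) (w : List Char) (res : Int) (last : String),
    w.length ≤ k → RelAB res last → (auxB w last = true ↔ loopA w res = []) := by
  intro k
  induction k with
  | zero =>
    intro w res last hlen _
    have hw : w = [] := by cases w <;> simp_all
    subst hw; simp [auxB, loopA]
  | succ k ih =>
    intro w res last hlen hrel
    cases w with
    | nil => simp [auxB, loopA]
    | cons c rest =>
      obtain ⟨r1, r2, r3, r4⟩ := rel_char _ _ hrel
      simp at hlen
      by_cases hca : c = 'a'
      · subst hca
        by_cases hres : res = 1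
        · have hlast := r1.mp hres; subst hlast
          rw [auxB_cons, loopA, findA_self, if_pos rfl, if_pos hres]
          simp
        · have hlast : last ≠ "aya" := fun hh => hres (r1.mpr hh)
          cases hP : ['y','a'].isPrefixOf rest with
          | true =>
            have htk : rest.take 2 = ['y','a'] := by simpa using (ipo_take _ _).mp hP
            have hmem : String.ofList (('a'::rest).take 3) ∈ (["aya","ye","woo","ma"] : List String) := by
              rw [show ('a'::rest).take 3 = 'a' :: rest.take 2 from rfl, htk]
              exact (mem4 _).mpr (Or.inl rfl)
            rw [auxB_cons, loopA, findA last rest hlast, if_pos hP, if_pos rfl, if_neg hres, if_pos hmem]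
            have hb : (rest.drop 2).length ≤ k := by simp; omega
            simpa [wordLen1] using ih (rest.drop 2) 1 "aya" hb (Or.inr (Or.inl ⟨rfl, rfl⟩))
          | false =>
            have hmem : ¬ String.ofList (('a'::rest).take 3) ∈ (["aya","ye","woo","ma"] : List String) := by
              rw [show ('a'::rest).take 3 = 'a' :: rest.take 2 from rfl, memA]
              intro hEq
              have := (ipo_take ['y','a'] rest).mpr (by simpa using hEq)
              simp [hP] at this
            rw [auxB_cons, loopA, findA last rest hlast, if_neg (by simp [hP]), if_pos rfl, if_neg hres, if_neg hmem]
            simp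
      · by_cases hcw : c = 'w'
        · subst hcw
          by_cases hres : res = 2
          · have hlast := r2.mp hres; subst hlast
            rw [auxB_cons, loopA, findW_self, if_neg (by decide), if_pos rfl, if_pos hres]
            simp
          · have hlast : last ≠ "woo" := fun hh => hres (r2.mpr hh)
            cases hP : ['o','o'].isPrefixOf rest with
            | true =>
              have htk : rest.take 2 = ['o','o'] := by simpa using (ipo_take _ _).mp hP
              have hmem : String.ofList (('w'::rest).take 3) ∈ (["aya","ye","woo","ma"] : List String) := by
                rw [show ('w'::rest).take 3 = 'w' :: rest.take 2 from rfl, htk]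
                exact (mem4 _).mpr (Or.inr (Or.inr (Or.inl rfl)))
              rw [auxB_cons, loopA, findW last rest hlast, if_pos hP, if_neg (by decide), if_pos rfl, if_neg hres, if_pos hmem]
              have hb : (rest.drop 2).length ≤ k := by simp; omega
              simpa [wordLen2] using ih (rest.drop 2) 2 "woo" hb (Or.inr (Or.inr (Or.inl ⟨rfl, rfl⟩)))
            | false =>
              have hmem : ¬ String.ofList (('w'::rest).take 3) ∈ (["aya","ye","woo","ma"] : List String) := by
                rw [show ('w'::rest).take 3 = 'w' :: rest.take 2 from rfl, memW]
                intro hEq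
                have := (ipo_take ['o','o'] rest).mpr (by simpa using hEq)
                simp [hP] at this
              rw [auxB_cons, loopA, findW last rest hlast, if_neg (by simp [hP]), if_neg (by decide), if_pos rfl, if_neg hres, if_neg hmem]
              simp
        · by_cases hcy : c = 'y'
          · subst hcy
            by_cases hres : res = 3
            · have hlast := r3.mp hres; subst hlast
              rw [auxB_cons, loopA, findY_self, if_neg (by decide), if_neg (by decide), if_pos rfl, if_pos hres]
              simp
            · have hlast : last ≠ "ye" := fun hh => hres (r3.mpr hh)
              cases hP : ['e'].isPrefixOf rest with
              | true =>
                have htk : rest.take 1 = ['e'] := by simpa using (ipo_take _ _).mp hP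
                have hmem : String.ofList (('y'::rest).take 2) ∈ (["aya","ye","woo","ma"] : List String) := by
                  rw [show ('y'::rest).take 2 = 'y' :: rest.take 1 from rfl, htk]
                  exact (mem4 _).mpr (Or.inr (Or.inl rfl))
                rw [auxB_cons, loopA, findY last rest hlast, if_pos hP, if_neg (by decide), if_neg (by decide), if_pos rfl, if_neg hres, if_pos hmem]
                have hb : (rest.drop 1).length ≤ k := by simp; omega
                simpa [wordLen3] using ih (rest.drop 1) 3 "ye" hb (Or.inr (Or.inr (Or.inr (Or.inl ⟨rfl, rfl⟩))))
              | false =>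
                have hmem : ¬ String.ofList (('y'::rest).take 2) ∈ (["aya","ye","woo","ma"] : List String) := by
                  rw [show ('y'::rest).take 2 = 'y' :: rest.take 1 from rfl, memY]
                  intro hEq
                  have := (ipo_take ['e'] rest).mpr (by simpa using hEq)
                  simp [hP] at this
                rw [auxB_cons, loopA, findY last rest hlast, if_neg (by simp [hP]), if_neg (by decide), if_neg (by decide), if_pos rfl, if_neg hres, if_neg hmem]
                simp
          · by_cases hcm : c = 'm'
            · subst hcm
              by_cases hres : res = 4
              · have hlast := r4.mp hres; subst hlast
                rw [auxB_cons, loopA, findM_self, if_neg (by decide), if_neg (by decide), if_neg (by decide), if_pos rfl, if_pos hres]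
                simp
              · have hlast : last ≠ "ma" := fun hh => hres (r4.mpr hh)
                cases hP : ['a'].isPrefixOf rest with
                | true =>
                  have htk : rest.take 1 = ['a'] := by simpa using (ipo_take _ _).mp hP
                  have hmem : String.ofList (('m'::rest).take 2) ∈ (["aya","ye","woo","ma"] : List String) := by
                    rw [show ('m'::rest).take 2 = 'm' :: rest.take 1 from rfl, htk]
                    exact (mem4 _).mpr (Or.inr (Or.inr (Or.inr rfl)))
                  rw [auxB_cons, loopA, findM last rest hlast, if_pos hP, if_neg (by decide), if_neg (by decide), if_neg (by decide), if_pos rfl, if_neg hres, if_pos hmem]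
                  have hb : (rest.drop 1).length ≤ k := by simp; omega
                  simpa [wordLen4] using ih (rest.drop 1) 4 "ma" hb (Or.inr (Or.inr (Or.inr (Or.inr ⟨rfl, rfl⟩))))
                | false =>
                  have hmem : ¬ String.ofList (('m'::rest).take 2) ∈ (["aya","ye","woo","ma"] : List String) := by
                    rw [show ('m'::rest).take 2 = 'm' :: rest.take 1 from rfl, memM]
                    intro hEq
                    have := (ipo_take ['a'] rest).mpr (by simpa using hEq)
                    simp [hP] at this
                  rw [auxB_cons, loopA, findM last rest hlast, if_neg (by simp [hP]), if_neg (by decide), if_neg (by decide), if_neg (by decide), if_pos rfl, if_neg hres, if_neg hmem]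
                  simp
            · rw [auxB_cons, loopA, find_other last c rest hca hcw hcy hcm,
                if_neg hca, if_neg hcw, if_neg hcy, if_neg hcm]
              simp

theorem babTable_none {c : Char} (h1 : c ≠ 'a') (h2 : c ≠ 'y') (h3 : c ≠ 'w') (h4 : c ≠ 'm') :
    PySem.Dict.get? babTable c = none := by
  simp [babTable, PySem.Dict.get?, PySem.Dict.ofList]
  intro a b hab
  have hab2 : (a, b) ∈ babTable.items := hab
  rw [babTable_items] at hab2
  fin_cases hab2
  · exact fun hh => h1 hh.symm
  · exact fun hh => h2 hh.symm
  · exact fun hh => h3 hh.symm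
  · exact fun hh => h4 hh.symm

theorem loopB_eq_auxB : ∀ (k : Nat) (s : List Char) (i : Nat) (last : String),
    s.length - i ≤ k → i ≤ s.length →
    (loopB s i last = s.length ↔ auxB (s.drop i) last = true) := by
  intro k
  induction k with
  | zero =>
    intro s i last hk hle
    have hi : i = s.length := by omega
    rw [loopB, dif_neg (by omega)]
    subst hi
    simp [List.drop_length, auxB]
  | succ k ih =>
    intro s i last hk hle
    by_cases hlt : i < s.length
    · obtain ⟨c, rest, hcr⟩ : ∃ c rest, s.drop i = c :: rest := by
        cases hd : s.drop i with
        | nil => exfalso; have := List.length_drop (l := s) (i := i); simp [hd] at this; omega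
        | cons c rest => exact ⟨c, rest, rfl⟩
      have hci : s[i]'hlt = c := by
        have h0 : (s.drop i)[0]'(by rw [hcr]; simp) = c := by simp [hcr]
        rw [List.getElem_drop] at h0
        simpa using h0
      by_cases hca : c = 'a'
      · subst hca
        have hg : PySem.Dict.get? babTable (s[i]'hlt) = some "aya" := by rw [hci]; decide
        rw [loopB_step s i last hlt "aya" hg, hcr, auxB_cons]
        by_cases hlast : last = "aya"
        · subst hlast
          rw [if_pos (Or.inl rfl), findA_self]
          simp
          omega
        · cases hpre : (("aya" : String).toList.isPrefixOf (s.drop i)) with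
          | false =>
            have hyA : ['y','a'].isPrefixOf rest = false := by
              rw [hcr] at hpre; simpa [tlA, List.isPrefixOf] using hpre
            rw [if_pos (Or.inr (by
              intro hc
              rw [show (("aya" : String).toList.isPrefixOf ('a'::rest)) = (['y','a'].isPrefixOf rest) from by
                simp [tlA, List.isPrefixOf], hyA] at hc
              exact Bool.noConfusion hc)), findA last rest hlast, if_neg (fun hc => by rw [hyA] at hc; exact Bool.noConfusion hc)]
            simp
            omega
          | true =>
            have hyA : ['y','a'].isPrefixOf rest = true := by
              rw [hcr] at hpre; simpa [tlA, List.isPrefixOf] using hpre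
            rw [if_neg (by rw [hcr] at hpre; exact fun hcon => Or.elim hcon (fun hh => hlast hh.symm) fun hn => hn hpre),
              findA last rest hlast, if_pos hyA]
            have hdd : (('a'::rest).drop ("aya" : String).length) = s.drop (i + ("aya" : String).length) := by
              rw [← hcr, List.drop_drop, Nat.add_comm]
            have hge : ("aya" : String).toList.length ≤ (s.drop i).length :=
              List.IsPrefix.length_le (List.isPrefixOf_iff_prefix.mp hpre)
            rw [List.length_drop, tlA] at hge
            have hih := ih s (i + ("aya" : String).length) "aya"
              (by rw [wordLen1]; simp at hge; omega) (by rw [wordLen1]; simp at hge; omega)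
            simpa [← hdd] using hih
      · by_cases hcw : c = 'w'
        · subst hcw
          have hg : PySem.Dict.get? babTable (s[i]'hlt) = some "woo" := by rw [hci]; decide
          rw [loopB_step s i last hlt "woo" hg, hcr, auxB_cons]
          by_cases hlast : last = "woo"
          · subst hlast
            rw [if_pos (Or.inl rfl), findW_self]
            simp
            omega
          · cases hpre : (("woo" : String).toList.isPrefixOf (s.drop i)) with
            | false =>
              have hyA : ['o','o'].isPrefixOf rest = false := by
                rw [hcr] at hpre; simpa [tlC, List.isPrefixOf] using hpre
              rw [if_pos (Or.inr (by
              intro hc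
              rw [show (("woo" : String).toList.isPrefixOf ('w'::rest)) = (['o','o'].isPrefixOf rest) from by
                simp [tlC, List.isPrefixOf], hyA] at hc
              exact Bool.noConfusion hc)), findW last rest hlast, if_neg (fun hc => by rw [hyA] at hc; exact Bool.noConfusion hc)]
              simp
              omega
            | true =>
              have hyA : ['o','o'].isPrefixOf rest = true := by
                rw [hcr] at hpre; simpa [tlC, List.isPrefixOf] using hpre
              rw [if_neg (by rw [hcr] at hpre; exact fun hcon => Or.elim hcon (fun hh => hlast hh.symm) fun hn => hn hpre),
                findW last rest hlast, if_pos hyA]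
              have hdd : (('w'::rest).drop ("woo" : String).length) = s.drop (i + ("woo" : String).length) := by
                rw [← hcr, List.drop_drop, Nat.add_comm]
              have hge : ("woo" : String).toList.length ≤ (s.drop i).length :=
                List.IsPrefix.length_le (List.isPrefixOf_iff_prefix.mp hpre)
              rw [List.length_drop, tlC] at hge
              have hih := ih s (i + ("woo" : String).length) "woo"
                (by rw [wordLen2]; simp at hge; omega) (by rw [wordLen2]; simp at hge; omega)
              simpa [← hdd] using hih
        · by_cases hcy : c = 'y'
          · subst hcy
            have hg : PySem.Dict.get? babTable (s[i]'hlt) = some "ye" := by rw [hci]; decide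
            rw [loopB_step s i last hlt "ye" hg, hcr, auxB_cons]
            by_cases hlast : last = "ye"
            · subst hlast
              rw [if_pos (Or.inl rfl), findY_self]
              simp
              omega
            · cases hpre : (("ye" : String).toList.isPrefixOf (s.drop i)) with
              | false =>
                have hyA : ['e'].isPrefixOf rest = false := by
                  rw [hcr] at hpre; simpa [tlB, List.isPrefixOf] using hpre
                rw [if_pos (Or.inr (by
              intro hc
              rw [show (("ye" : String).toList.isPrefixOf ('y'::rest)) = (['e'].isPrefixOf rest) from by
                simp [tlB, List.isPrefixOf], hyA] at hc
              exact Bool.noConfusion hc)), findY last rest hlast, if_neg (fun hc => by rw [hyA] at hc; exact Bool.noConfusion hc)]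
                simp
                omega
              | true =>
                have hyA : ['e'].isPrefixOf rest = true := by
                  rw [hcr] at hpre; simpa [tlB, List.isPrefixOf] using hpre
                rw [if_neg (by rw [hcr] at hpre; exact fun hcon => Or.elim hcon (fun hh => hlast hh.symm) fun hn => hn hpre),
                  findY last rest hlast, if_pos hyA]
                have hdd : (('y'::rest).drop ("ye" : String).length) = s.drop (i + ("ye" : String).length) := by
                  rw [← hcr, List.drop_drop, Nat.add_comm]
                have hge : ("ye" : String).toList.length ≤ (s.drop i).length :=
                  List.IsPrefix.length_le (List.isPrefixOf_iff_prefix.mp hpre)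
                rw [List.length_drop, tlB] at hge
                have hih := ih s (i + ("ye" : String).length) "ye"
                  (by rw [wordLen3]; simp at hge; omega) (by rw [wordLen3]; simp at hge; omega)
                simpa [← hdd] using hih
          · by_cases hcm : c = 'm'
            · subst hcm
              have hg : PySem.Dict.get? babTable (s[i]'hlt) = some "ma" := by rw [hci]; decide
              rw [loopB_step s i last hlt "ma" hg, hcr, auxB_cons]
              by_cases hlast : last = "ma"
              · subst hlast
                rw [if_pos (Or.inl rfl), findM_self]
                simp
                omega
              · cases hpre : (("ma" : String).toList.isPrefixOf (s.drop i)) with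
                | false =>
                  have hyA : ['a'].isPrefixOf rest = false := by
                    rw [hcr] at hpre; simpa [tlD, List.isPrefixOf] using hpre
                  rw [if_pos (Or.inr (by
              intro hc
              rw [show (("ma" : String).toList.isPrefixOf ('m'::rest)) = (['a'].isPrefixOf rest) from by
                simp [tlD, List.isPrefixOf], hyA] at hc
              exact Bool.noConfusion hc)), findM last rest hlast, if_neg (fun hc => by rw [hyA] at hc; exact Bool.noConfusion hc)]
                  simp
                  omega
                | true =>
                  have hyA : ['a'].isPrefixOf rest = true := by
                    rw [hcr] at hpre; simpa [tlD, List.isPrefixOf] using hpre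
                  rw [if_neg (by rw [hcr] at hpre; exact fun hcon => Or.elim hcon (fun hh => hlast hh.symm) fun hn => hn hpre),
                    findM last rest hlast, if_pos hyA]
                  have hdd : (('m'::rest).drop ("ma" : String).length) = s.drop (i + ("ma" : String).length) := by
                    rw [← hcr, List.drop_drop, Nat.add_comm]
                  have hge : ("ma" : String).toList.length ≤ (s.drop i).length :=
                    List.IsPrefix.length_le (List.isPrefixOf_iff_prefix.mp hpre)
                  rw [List.length_drop, tlD] at hge
                  have hih := ih s (i + ("ma" : String).length) "ma"
                    (by rw [wordLen4]; simp at hge; omega) (by rw [wordLen4]; simp at hge; omega)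
                  simpa [← hdd] using hih
            · have hg : PySem.Dict.get? babTable (s[i]'hlt) = none := by
                rw [hci]; exact babTable_none hca hcy hcw hcm
              rw [loopB_stop s i last hlt hg, hcr, auxB_cons,
                find_other last c rest hca hcw hcy hcm]
              simp
              omega
    · have hi : i = s.length := by omega
      rw [loopB, dif_neg (by omega)]
      subst hi
      simp [List.drop_length, auxB]

theorem per_string (s : List Char) :
    (loopB s 0 "" = s.length) ↔ (loopA s 0).length = 0 := by
  have h1 := loopB_eq_auxB s.length s 0 "" (by omega) (by omega)
  rw [List.drop_zero] at h1
  rw [h1, aux_main s.length s 0 "" le_rfl (Or.inl ⟨rfl, rfl⟩), List.length_eq_zero_iff]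

theorem fold_eq (l : List String) : solution l = solution_alt l := by
  unfold solution solution_alt
  induction l using List.reverseRecOn with
  | nil => rfl
  | append_singleton xs x ihx =>
    rw [List.foldl_append, List.foldl_append, ihx]
    simp only [List.foldl]
    by_cases h : loopB x.toList 0 "" = x.toList.length
    · rw [if_pos ((per_string x.toList).mp h), if_pos h]
    · rw [if_neg (fun hh => h ((per_string x.toList).mpr hh)), if_neg h]
      simp

theorem solution_spec : Claim_equal_solution := by
  intro babbling _
  exact fold_eq babbling
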